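-- pv_equiv track=rewrite | github.com/diegopastor/competitiveProgramming | CodeJam/2017/B.py | subeybaja
-- ===== SOURCE A (Python) =====
-- def subeybaja(s):
--     n = str(s)
--     sube = False
--     baja = False
--     for i in range(len(n)-1):
--         if int(n[i]) < int(n[i+1]):
--             sube = True
--         if int(n[i]) > int(n[i+1]):
--             baja = True
--     if sube == True and baja == True:
--         return True
--     else: return False
-- ===== SOURCE B (Python) =====
-- def subeybaja(s):
--     n = str(s)
--     if len(n) < 2:
--         return False
--     l = [int(c) for c in n]
--     return l != sorted(l, reverse=True) and l != sorted(l)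
-- ===== Notes on version B (the rewrite author's own statement) =====
-- stated objective: alternative
-- what changed: Replaces the index loop that tracks sube/baja flags over every adjacent pair with a sort-and-compare monotonicity test on the digit list: the digits both rise and fall iff the list differs from both its reverse-sorted and its sorted arrangement (with an early False for fewer than two digits).
import Mathlib
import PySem

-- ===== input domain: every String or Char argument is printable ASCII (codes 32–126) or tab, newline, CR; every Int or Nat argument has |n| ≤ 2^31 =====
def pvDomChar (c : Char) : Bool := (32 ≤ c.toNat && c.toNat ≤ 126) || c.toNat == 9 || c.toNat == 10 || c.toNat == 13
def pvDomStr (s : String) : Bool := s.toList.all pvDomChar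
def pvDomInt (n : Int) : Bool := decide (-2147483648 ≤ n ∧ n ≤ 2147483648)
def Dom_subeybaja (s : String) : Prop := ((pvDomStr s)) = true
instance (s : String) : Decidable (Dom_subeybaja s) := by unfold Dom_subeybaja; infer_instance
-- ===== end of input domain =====

-- B replaces A's adjacent-pair flag loop with a sort-and-compare monotonicity test on the digit list (objective: alternative; no speed claim).

-- ===== PORT A =====
def subeybaja (s : String) : Bool :=
  let n := s.toList
  let st := (PySem.List.pyRange 0 ((n.length : Int) - 1) 1).foldl
    (fun (st : Bool × Bool) i =>
      let sube := if (PySem.Int.ofChars? [PySem.List.pyGetD n i ' ']).getD 0 <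
                     (PySem.Int.ofChars? [PySem.List.pyGetD n (i + 1) ' ']).getD 0 then true else st.1
      let baja := if (PySem.Int.ofChars? [PySem.List.pyGetD n i ' ']).getD 0 >
                     (PySem.Int.ofChars? [PySem.List.pyGetD n (i + 1) ' ']).getD 0 then true else st.2
      (sube, baja)) (false, false)
  if st.1 = true ∧ st.2 = true then true else false

-- ===== PORT B =====
def subeybaja_alt (s : String) : Bool :=
  if s.toList.length < 2 then false
  else
    let l := s.toList.map (fun c => (PySem.Int.ofChars? [c]).getD 0)
    decide (l ≠ PySem.List.sorted l (fun x => x) true) &&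
    decide (l ≠ PySem.List.sorted l (fun x => x) false)

-- ===== PRECONDITION & SPEC =====
-- Pre_ excludes strings of length ≥ 2 containing a non-digit character: there A raises ValueError (int(c)).
def Pre_subeybaja (s : String) : Prop :=
  s.toList.length ≤ 1 ∨ s.toList.all (fun c => decide ('0' ≤ c ∧ c ≤ '9')) = true
instance (s : String) : Decidable (Pre_subeybaja s) := by unfold Pre_subeybaja; infer_instance
def pvWitness_subeybaja : String := "1021"

def Spec_subeybaja (s : String) (out : Bool) : Prop := out = subeybaja_alt s
instance (s : String) (out : Bool) : Decidable (Spec_subeybaja s out) := by unfold Spec_subeybaja; infer_instance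

-- ===== CLAIM (what is proved, stated in full; the proofs are below) =====
def Claim_equal_subeybaja : Prop := ∀ (s : String), Dom_subeybaja s → Pre_subeybaja s → Spec_subeybaja s (subeybaja s)

-- ===== LEMMAS AND PROOFS =====

-- the index pairs A reads are exactly the adjacent pairs of the list
theorem pv_range_zip (l : List Char) :
    (List.range (l.length - 1)).map (fun k => (l.getD k ' ', l.getD (k + 1) ' ')) = l.zip l.tail := by
  induction l with
  | nil => simp
  | cons a t ih =>
    cases t with
    | nil => simp
    | cons b t' =>
      simp only [List.length_cons, Nat.add_sub_cancel, List.range_succ_eq_map, List.map_cons,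
        List.map_map]
      simp only [List.getD_cons_zero, List.getD_cons_succ, List.zip_cons_cons, List.tail_cons]
      refine congrArg (List.cons _) ?_
      have := ih
      simp only [List.length_cons, Nat.add_sub_cancel, List.tail_cons] at this
      rw [← this]
      rfl

theorem pv_pairs_map (l : List Char) :
    (PySem.List.pyRange 0 ((l.length : Int) - 1) 1).map
      (fun i => (PySem.List.pyGetD l i ' ', PySem.List.pyGetD l (i + 1) ' ')) = l.zip l.tail := by
  rw [PySem.List.pyRange_one]
  rw [List.map_map]
  have hcast : ((l.length : Int) - 1 - 0).toNat = l.length - 1 := by omega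
  rw [hcast, ← pv_range_zip l]
  refine List.map_congr_left ?_
  intro k _
  have h1 : (0 : Int) + (k : Int) = ((k : Nat) : Int) := by ring
  simp only [Function.comp, h1, PySem.List.pyGetD_natCast]
  rw [show ((k : Nat) : Int) + 1 = (((k + 1 : Nat)) : Int) by push_cast; ring,
    PySem.List.pyGetD_natCast]

-- the OR-accumulating fold is List.any on each component
theorem pv_foldl_any (P Q : Char × Char → Prop) [DecidablePred P] [DecidablePred Q]
    (ps : List (Char × Char)) (x y : Bool) :
    ps.foldl (fun st p => (if P p then true else st.1, if Q p then true else st.2)) (x, y) =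
      (x || ps.any (fun p => decide (P p)), y || ps.any (fun p => decide (Q p))) := by
  induction ps generalizing x y with
  | nil => simp
  | cons p ps ih =>
    simp only [List.foldl_cons, List.any_cons, ih]
    by_cases hP : P p <;> by_cases hQ : Q p <;> simp [hP, hQ]

theorem pv_chain_zip (R : Int → Int → Prop) [DecidableRel R] (l : List Int) :
    l.IsChain R ↔ ∀ p ∈ l.zip l.tail, R p.1 p.2 := by
  induction l with
  | nil => simp
  | cons a t ih =>
    cases t with
    | nil => simp
    | cons b t' =>
      simp only [List.isChain_cons_cons, List.zip_cons_cons, List.tail_cons, List.mem_cons] at *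
      constructor
      · rintro ⟨hab, hc⟩ p hp
        rcases hp with rfl | hp
        · exact hab
        · exact (ih.mp hc) p hp
      · intro h
        exact ⟨h _ (Or.inl rfl), ih.mpr (fun p hp => h p (Or.inr hp))⟩

theorem pv_sorted_asc_iff (l : List Int) :
    PySem.List.sorted l (fun x => x) false = l ↔ l.IsChain (· ≤ ·) := by
  constructor
  · intro h
    have := PySem.List.sorted_pairwise l (fun x => x)
    rw [h] at this
    exact this.isChain
  · intro h
    exact PySem.List.sorted_eq_self_of_pairwise _ _ h.pairwise

theorem pv_sorted_desc_iff (l : List Int) :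
    PySem.List.sorted l (fun x => x) true = l ↔ l.IsChain (fun a b => b ≤ a) := by
  constructor
  · intro h
    have := PySem.List.sorted_pairwise_rev l (fun x => x)
    rw [h] at this
    exact this.isChain
  · intro h
    exact PySem.List.sorted_rev_eq_self_of_pairwise _ _ h.pairwise

-- B in adjacent-pair form (over the Int list it builds)
theorem pv_B_any_int (l : List Int) :
    (decide (l ≠ PySem.List.sorted l (fun x => x) true) &&
     decide (l ≠ PySem.List.sorted l (fun x => x) false)) =
    ((l.zip l.tail).any (fun p => decide (p.1 < p.2)) &&
     (l.zip l.tail).any (fun p => decide (p.2 < p.1))) := by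
  have h1 : (decide (l ≠ PySem.List.sorted l (fun x => x) true)) =
      (l.zip l.tail).any (fun p => decide (p.1 < p.2)) := by
    rcases h : (l.zip l.tail).any (fun p => decide (p.1 < p.2)) with _ | _
    · simp only [List.any_eq_false, decide_eq_true_eq] at h
      have : PySem.List.sorted l (fun x => x) true = l :=
        (pv_sorted_desc_iff l).mpr ((pv_chain_zip _ l).mpr (fun p hp => le_of_not_gt (h p hp)))
      simp [this]
    · simp only [List.any_eq_true, decide_eq_true_eq] at h
      obtain ⟨p, hp, hlt⟩ := h
      have : PySem.List.sorted l (fun x => x) true ≠ l := by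
        intro hc
        exact absurd ((pv_chain_zip (fun a b => b ≤ a) l).mp ((pv_sorted_desc_iff l).mp hc) p hp)
          (not_le_of_gt hlt)
      simp [Ne.symm this]
  have h2 : (decide (l ≠ PySem.List.sorted l (fun x => x) false)) =
      (l.zip l.tail).any (fun p => decide (p.2 < p.1)) := by
    rcases h : (l.zip l.tail).any (fun p => decide (p.2 < p.1)) with _ | _
    · simp only [List.any_eq_false, decide_eq_true_eq] at h
      have : PySem.List.sorted l (fun x => x) false = l :=
        (pv_sorted_asc_iff l).mpr ((pv_chain_zip _ l).mpr (fun p hp => le_of_not_gt (h p hp)))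
      simp [this]
    · simp only [List.any_eq_true, decide_eq_true_eq] at h
      obtain ⟨p, hp, hlt⟩ := h
      have : PySem.List.sorted l (fun x => x) false ≠ l := by
        intro hc
        exact absurd ((pv_chain_zip (fun a b => a ≤ b) l).mp ((pv_sorted_asc_iff l).mp hc) p hp)
          (not_le_of_gt hlt)
      simp [Ne.symm this]
  rw [h1, h2]

-- A in adjacent-pair form
theorem pv_A_any (s : String) :
    subeybaja s = ((s.toList.zip s.toList.tail).any
        (fun p => decide ((PySem.Int.ofChars? [p.1]).getD 0 < (PySem.Int.ofChars? [p.2]).getD 0)) &&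
      (s.toList.zip s.toList.tail).any
        (fun p => decide ((PySem.Int.ofChars? [p.2]).getD 0 < (PySem.Int.ofChars? [p.1]).getD 0))) := by
  have hdef : subeybaja s =
      (let st := (PySem.List.pyRange 0 ((s.toList.length : Int) - 1) 1).foldl
        (fun (st : Bool × Bool) i =>
          (if (PySem.Int.ofChars? [PySem.List.pyGetD s.toList i ' ']).getD 0 <
              (PySem.Int.ofChars? [PySem.List.pyGetD s.toList (i + 1) ' ']).getD 0 then true else st.1,
           if (PySem.Int.ofChars? [PySem.List.pyGetD s.toList i ' ']).getD 0 >
              (PySem.Int.ofChars? [PySem.List.pyGetD s.toList (i + 1) ' ']).getD 0 then true else st.2))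
        (false, false)
       if st.1 = true ∧ st.2 = true then true else false) := rfl
  rw [hdef]
  set l := s.toList with hl
  have hfold : (PySem.List.pyRange 0 ((l.length : Int) - 1) 1).foldl
      (fun (st : Bool × Bool) i =>
        (if (PySem.Int.ofChars? [PySem.List.pyGetD l i ' ']).getD 0 <
            (PySem.Int.ofChars? [PySem.List.pyGetD l (i + 1) ' ']).getD 0 then true else st.1,
         if (PySem.Int.ofChars? [PySem.List.pyGetD l i ' ']).getD 0 >
            (PySem.Int.ofChars? [PySem.List.pyGetD l (i + 1) ' ']).getD 0 then true else st.2))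
      (false, false) =
      ((l.zip l.tail).any
        (fun p => decide ((PySem.Int.ofChars? [p.1]).getD 0 < (PySem.Int.ofChars? [p.2]).getD 0)),
       (l.zip l.tail).any
        (fun p => decide ((PySem.Int.ofChars? [p.2]).getD 0 < (PySem.Int.ofChars? [p.1]).getD 0))) := by
    have hm := (List.foldl_map
      (f := fun i => (PySem.List.pyGetD l i ' ', PySem.List.pyGetD l (i + 1) ' '))
      (g := fun (st : Bool × Bool) (p : Char × Char) =>
        (if (PySem.Int.ofChars? [p.1]).getD 0 < (PySem.Int.ofChars? [p.2]).getD 0 then true else st.1,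
         if (PySem.Int.ofChars? [p.2]).getD 0 < (PySem.Int.ofChars? [p.1]).getD 0 then true else st.2))
      (l := PySem.List.pyRange 0 ((l.length : Int) - 1) 1)
      (init := ((false, false) : Bool × Bool))).symm
    rw [pv_pairs_map l] at hm
    rw [hm, pv_foldl_any]
    simp
  simp only []
  rw [hfold]
  by_cases h1 : (l.zip l.tail).any
      (fun p => decide ((PySem.Int.ofChars? [p.1]).getD 0 < (PySem.Int.ofChars? [p.2]).getD 0)) <;>
  by_cases h2 : (l.zip l.tail).any
      (fun p => decide ((PySem.Int.ofChars? [p.2]).getD 0 < (PySem.Int.ofChars? [p.1]).getD 0)) <;>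
  simp [h1, h2]

-- ===== VERDICT (by name: the statement is the Claim_ definition above) =====
theorem subeybaja_spec : Claim_equal_subeybaja := by
  intro s _ _
  unfold Spec_subeybaja
  by_cases hlen : s.toList.length < 2
  · have hz : s.toList.zip s.toList.tail = [] := by
      match h : s.toList with
      | [] => rfl
      | [a] => rfl
      | a :: b :: t => rw [h] at hlen; simp at hlen
    have hB : subeybaja_alt s = false := by
      unfold subeybaja_alt
      rw [if_pos hlen]
    rw [pv_A_any, hz, hB]
    rfl
  · have hdefB : subeybaja_alt s =
        (decide ((s.toList.map (fun c => (PySem.Int.ofChars? [c]).getD 0)) ≠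
            PySem.List.sorted (s.toList.map (fun c => (PySem.Int.ofChars? [c]).getD 0)) (fun x => x) true) &&
         decide ((s.toList.map (fun c => (PySem.Int.ofChars? [c]).getD 0)) ≠
            PySem.List.sorted (s.toList.map (fun c => (PySem.Int.ofChars? [c]).getD 0)) (fun x => x) false)) := by
      unfold subeybaja_alt
      rw [if_neg hlen]
    rw [pv_A_any, hdefB, pv_B_any_int]
    set va : Char → Int := fun c => (PySem.Int.ofChars? [c]).getD 0 with hva
    have hzip : (s.toList.map va).zip (s.toList.map va).tail =
        (s.toList.zip s.toList.tail).map (Prod.map va va) := by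
      rw [← List.map_tail, List.zip_map]
    rw [hzip, List.any_map, List.any_map]
    rfl
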